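-- pv_equiv track=rewrite | github.com/lethuongde290605/Tucker-TensorTrain-decomposition | test_tensortrain.py | compute_max_ranks
-- ===== SOURCE A (Python) =====
-- import math
--
-- def compute_max_ranks(dims: list[int]) -> list[int]:
--     """
--     Compute maximum TT-ranks for a tensor with given mode dimensions.
--
--     max_rank[i] = min(product(dims[:i]), product(dims[i:]))
--
--     Args:
--         dims: Mode dimensions of the N-D tensor.
--
--     Returns:
--         List of N+1 integers (first and last are always 1).
--     """
--     n = len(dims)
--     max_ranks = [1]
--     for i in range(1, n):
--         left = math.prod(dims[:i])
--         right = math.prod(dims[i:])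
--         max_ranks.append(min(left, right))
--     max_ranks.append(1)
--     return max_ranks
-- ===== SOURCE B (Python) =====
-- def compute_max_ranks(dims: list[int]) -> list[int]:
--     """
--     Compute maximum TT-ranks for a tensor with given mode dimensions.
--
--     max_rank[i] = min(product(dims[:i]), product(dims[i:]))
--
--     O(n): suffix products are built once in a backward pass and prefix
--     products are accumulated in the forward pass, instead of recomputing
--     both products from scratch for every split point.
--     """
--     suf = [1]
--     for d in reversed(dims):
--         suf.append(d * suf[-1])
--     suf.reverse()  # suf[i] == product(dims[i:])
--     res = [1]
--     left = 1
--     for d, s in zip(dims[:-1], suf[1:]):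
--         left *= d
--         res.append(min(left, s))
--     res.append(1)
--     return res
-- ===== Notes on version B (the rewrite author's own statement) =====
-- stated objective: faster
-- what changed: Replaced the per-split recomputation of both products over slices by a single backward pass of suffix products plus a running prefix product in one forward pass.
import Mathlib
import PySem

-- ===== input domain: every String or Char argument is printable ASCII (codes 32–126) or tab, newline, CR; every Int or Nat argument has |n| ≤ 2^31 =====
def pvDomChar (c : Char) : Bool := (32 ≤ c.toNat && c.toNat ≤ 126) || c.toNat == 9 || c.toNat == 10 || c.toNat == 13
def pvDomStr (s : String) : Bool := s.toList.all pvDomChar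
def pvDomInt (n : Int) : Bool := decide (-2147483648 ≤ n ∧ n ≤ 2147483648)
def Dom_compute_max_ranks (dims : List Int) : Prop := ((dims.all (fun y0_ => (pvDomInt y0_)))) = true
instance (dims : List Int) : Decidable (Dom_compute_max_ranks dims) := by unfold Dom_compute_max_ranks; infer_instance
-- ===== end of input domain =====

-- B replaces A's per-split slice products (O(n^2)) by one backward suffix-product pass
-- plus a running prefix product in one forward pass (O(n)).

-- ===== PORT A =====
def compute_max_ranks (dims : List Int) : List Int :=
  let n : Int := dims.length
  let max_ranks := (PySem.List.pyRange 1 n 1).foldl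
    (fun acc i =>
      let left := (PySem.List.slice dims none (some i)).foldl (· * ·) 1
      let right := (PySem.List.slice dims (some i) none).foldl (· * ·) 1
      acc ++ [min left right]) [1]
  max_ranks ++ [1]

-- ===== PORT B =====
def compute_max_ranks_alt (dims : List Int) : List Int :=
  -- suf[i] = product(dims[i:]), built by one backward pass (suf[-1] → getLastD)
  let suf := (dims.reverse.foldl (fun acc d => acc ++ [d * acc.getLastD 1]) [1]).reverse
  let res := ((dims.dropLast).zip (suf.drop 1)).foldl
    (fun (st : List Int × Int) p =>
      let left := st.2 * p.1
      (st.1 ++ [min left p.2], left)) ([1], 1)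
  res.1 ++ [1]

-- ===== PRECONDITION & SPEC =====
def Spec_compute_max_ranks (dims : List Int) (out : List Int) : Prop := out = compute_max_ranks_alt dims
instance (dims : List Int) (out : List Int) : Decidable (Spec_compute_max_ranks dims out) := by unfold Spec_compute_max_ranks; infer_instance

-- ===== CLAIM (what is proved, stated in full; the proofs are below) =====
def Claim_equal_compute_max_ranks : Prop := ∀ (dims : List Int), Dom_compute_max_ranks dims → Spec_compute_max_ranks dims (compute_max_ranks dims)

-- ===== LEMMAS AND PROOFS =====

-- the common reference value: 1 :: [min (prod dims[:k+1]) (prod dims[k+1:]) for k < n-1] ++ [1]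
def pvRef (dims : List Int) : List Int :=
  1 :: ((List.range (dims.length - 1)).map
    (fun k => min ((dims.take (k + 1)).prod) ((dims.drop (k + 1)).prod))) ++ [1]

theorem compute_max_ranks_eq_ref (dims : List Int) : compute_max_ranks dims = pvRef dims := by
  unfold compute_max_ranks pvRef
  dsimp only
  rw [PySem.List.foldl_append_singleton_eq_map, PySem.List.pyRange_one]
  have hlen : (((dims.length : Int)) - 1).toNat = dims.length - 1 := by omega
  rw [hlen, List.map_map, List.singleton_append]
  congr 2
  apply List.map_congr_left
  intro k _
  have h1 : (1 + (k : Int)) = ((k + 1 : Nat) : Int) := by push_cast; ring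
  simp only [Function.comp, h1, PySem.List.slice_to_natCast, PySem.List.slice_from_natCast,
    ← List.prod_eq_foldl]

-- B's suffix list before the final reverse
theorem suf_raw_eq (dims : List Int) :
    dims.reverse.foldl (fun acc d => acc ++ [d * acc.getLastD 1]) [1]
      = ((List.range (dims.length + 1)).map (fun i => (dims.drop i).prod)).reverse := by
  induction dims with
  | nil => rfl
  | cons d t ih =>
    rw [List.reverse_cons, List.foldl_append, ih]
    simp only [List.foldl_cons, List.foldl_nil]
    have h0 : (List.range (t.length + 1)).map (fun i => (t.drop i).prod)
        = t.prod :: (List.range t.length).map (fun i => (t.drop (i + 1)).prod) := by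
      rw [List.range_succ_eq_map]
      simp [List.map_map, Nat.succ_eq_add_one]
    have h1 : (List.range ((d :: t).length + 1)).map (fun i => ((d :: t).drop i).prod)
        = (d * t.prod) :: (List.range (t.length + 1)).map (fun i => (t.drop i).prod) := by
      rw [List.length_cons, List.range_succ_eq_map]
      simp [List.map_map, Nat.succ_eq_add_one]
    rw [h1, List.reverse_cons]
    congr 2
    rw [h0, List.reverse_cons]
    simp

-- B's forward loop, outputs only
def pvOut (a : Int) : List (Int × Int) → List Int
  | [] => []
  | p :: rest => min (a * p.1) p.2 :: pvOut (a * p.1) rest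

theorem foldl_out (l : List (Int × Int)) (res : List Int) (a : Int) :
    (l.foldl (fun (st : List Int × Int) p => (st.1 ++ [min (st.2 * p.1) p.2], st.2 * p.1)) (res, a)).1
      = res ++ pvOut a l := by
  induction l generalizing res a with
  | nil => simp [pvOut]
  | cons p rest ih => simp [pvOut, ih]

theorem pvOut_zip (dims : List Int) (a : Int) :
    pvOut a (dims.dropLast.zip ((List.range dims.length).map (fun i => (dims.drop (i + 1)).prod)))
      = (List.range (dims.length - 1)).map
          (fun k => min (a * (dims.take (k + 1)).prod) ((dims.drop (k + 1)).prod)) := by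
  induction dims generalizing a with
  | nil => rfl
  | cons d t ih =>
    cases t with
    | nil => rfl
    | cons e t' =>
      have hmap : (List.range (d :: e :: t').length).map (fun i => ((d :: e :: t').drop (i + 1)).prod)
          = (e :: t').prod :: (List.range (e :: t').length).map (fun i => ((e :: t').drop (i + 1)).prod) := by
        rw [List.length_cons, List.range_succ_eq_map]
        simp [List.map_map, Nat.succ_eq_add_one]
      rw [hmap]
      have hdl : (d :: e :: t').dropLast = d :: (e :: t').dropLast := rfl
      rw [hdl, List.zip_cons_cons]
      show min (a * d) (e :: t').prod :: pvOut (a * d) _ = _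
      rw [ih (a * d)]
      have hrng : (List.range ((d :: e :: t').length - 1)).map
            (fun k => min (a * ((d :: e :: t').take (k + 1)).prod) (((d :: e :: t').drop (k + 1)).prod))
          = min (a * d) (e :: t').prod ::
            (List.range ((e :: t').length - 1)).map
              (fun k => min (a * d * ((e :: t').take (k + 1)).prod) (((e :: t').drop (k + 1)).prod)) := by
        rw [show (d :: e :: t').length - 1 = ((e :: t').length - 1) + 1 by simp,
            List.range_succ_eq_map]
        simp only [List.map_cons, List.map_map]
        congr 1
        · simp
        · apply List.map_congr_left
          intro k _
          simp [Function.comp, Nat.succ_eq_add_one, List.take_succ_cons, mul_assoc]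
      rw [hrng]

theorem compute_max_ranks_alt_eq_ref (dims : List Int) : compute_max_ranks_alt dims = pvRef dims := by
  unfold compute_max_ranks_alt pvRef
  dsimp only
  rw [suf_raw_eq, List.reverse_reverse]
  have hdrop : ((List.range (dims.length + 1)).map (fun i => (dims.drop i).prod)).drop 1
      = (List.range dims.length).map (fun i => (dims.drop (i + 1)).prod) := by
    rw [List.range_succ_eq_map]
    simp [List.map_map, Nat.succ_eq_add_one]
  rw [hdrop, foldl_out, pvOut_zip, List.singleton_append]
  simp [one_mul]

-- ===== VERDICT (by name: the statement is the Claim_ definition above) =====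
theorem compute_max_ranks_spec : Claim_equal_compute_max_ranks := by
  intro dims _
  unfold Spec_compute_max_ranks
  rw [compute_max_ranks_eq_ref, compute_max_ranks_alt_eq_ref]
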